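-- pv_equiv track=rewrite | github.com/shahnehashah2/Challenge-Problems | launch_scrabble.py | launch_scrabble
-- ===== SOURCE A (Python) =====
-- def launch_scrabble(words):
--     """
--     All words receive 1 point. Words beginning with Qu receives 10 points. If there is a word beginning with Q but not Qu, return 0
--     for complete list
--     """
--
--     points = 0
--     for word in words:
--         word = word.upper()
--         if len(word) > 1 and word[0] == 'Q':
--             if word[1] == 'U':
--                 points += 10
--             else:
--                 return 0
--         else:
--             points += 1
--     return points
-- ===== SOURCE B (Python) =====
-- def _invalid(w):
--     return len(w) > 1 and w[0] == 'Q' and w[1] != 'U'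
--
--
-- def _score(w):
--     return 10 if len(w) > 1 and w.startswith('QU') else 1
--
--
-- def launch_scrabble(words):
--     ws = [w.upper() for w in words]
--     if any(_invalid(w) for w in ws):
--         return 0
--     return sum(_score(w) for w in ws)
-- ===== Notes on version B (the rewrite author's own statement) =====
-- stated objective: simpler
-- what changed: Replaces A's single interleaved accumulate-with-early-return loop by a validate-then-score decomposition: one pass checks for a Q-not-followed-by-U word (return 0), then a sum of per-word scores (10 for Qu-words, else 1).
import Mathlib
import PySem

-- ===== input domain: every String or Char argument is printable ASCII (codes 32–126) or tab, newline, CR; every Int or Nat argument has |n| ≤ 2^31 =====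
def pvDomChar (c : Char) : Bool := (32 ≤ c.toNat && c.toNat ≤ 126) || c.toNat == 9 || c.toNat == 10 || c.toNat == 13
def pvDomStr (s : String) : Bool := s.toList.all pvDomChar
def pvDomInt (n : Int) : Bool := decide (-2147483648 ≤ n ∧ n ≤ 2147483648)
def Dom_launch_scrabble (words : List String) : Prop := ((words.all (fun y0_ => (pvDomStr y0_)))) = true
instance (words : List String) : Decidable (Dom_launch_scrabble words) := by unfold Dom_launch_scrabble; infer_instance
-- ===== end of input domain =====

-- B replaces A's interleaved accumulate-with-early-return loop by a validate-then-score
-- decomposition (simpler); same return value on every input.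

-- ===== PORT A =====
-- A's loop with early return: structural recursion carrying the points accumulator.
def launchGo : List String → Int → Int
  | [], points => points
  | w :: rest, points =>
    let word := PySem.Str.upper w
    if PySem.Str.len word > 1 ∧ PySem.Str.pyGet? word 0 = some 'Q' then
      if PySem.Str.pyGet? word 1 = some 'U' then launchGo rest (points + 10)
      else 0
    else launchGo rest (points + 1)

def launch_scrabble (words : List String) : Int := launchGo words 0

-- ===== PORT B =====
def pvInvalid (w : String) : Bool :=
  decide (PySem.Str.len w > 1) && (PySem.Str.pyGet? w 0 == some 'Q') && !(PySem.Str.pyGet? w 1 == some 'U')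

def pvScore (w : String) : Int :=
  if PySem.Str.len w > 1 ∧ PySem.Str.startswith w "QU" = true then 10 else 1

def launch_scrabble_alt (words : List String) : Int :=
  let ws := words.map PySem.Str.upper
  if ws.any pvInvalid then 0 else (ws.map pvScore).sum

-- ===== PRECONDITION & SPEC =====
def Spec_launch_scrabble (words : List String) (out : Int) : Prop := out = launch_scrabble_alt words
instance (words : List String) (out : Int) : Decidable (Spec_launch_scrabble words out) := by unfold Spec_launch_scrabble; infer_instance

-- ===== CLAIM (what is proved, stated in full; the proofs are below) =====
def Claim_equal_launch_scrabble : Prop := ∀ (words : List String), Dom_launch_scrabble words → Spec_launch_scrabble words (launch_scrabble words)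

-- ===== LEMMAS AND PROOFS =====

theorem go_eq (ws : List String) (pts : Int) :
    launchGo ws pts =
      if (ws.map PySem.Str.upper).any pvInvalid then 0
      else pts + ((ws.map PySem.Str.upper).map pvScore).sum := by
  induction ws generalizing pts with
  | nil => simp [launchGo]
  | cons w rest ih =>
    simp only [launchGo, List.map_cons, List.any_cons, List.sum_cons]
    set word := PySem.Str.upper w with hword
    split
    · next h1 =>
      simp only [PySem.Str.len_eq, PySem.Str.pyGet?_eq,
        PySem.Chars.pyGet?_eq_listPyGet?,
        PySem.List.pyGet?_zero] at h1
      obtain ⟨hlen, hq⟩ := h1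
      split
      · next h2 =>
        simp only [PySem.Str.pyGet?_eq, PySem.Chars.pyGet?_eq_listPyGet?] at h2
        -- word.toList = 'Q' :: 'U' :: t
        obtain ⟨t, hl⟩ : ∃ t, word.toList = 'Q' :: 'U' :: t := by
          match hl : word.toList with
          | [] => rw [hl] at hq; simp at hq
          | [c] =>
            rw [hl] at h2
            simp [PySem.List.pyGet?, PySem.List.pyIdx?] at h2
          | c :: d :: t =>
            rw [hl] at hq h2
            rw [show (1 : Int) = ((1 : Nat) : Int) from rfl,
              PySem.List.pyGet?_natCast] at h2
            simp at hq h2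
            exact ⟨t, by rw [hq, h2]⟩
        have hinv : pvInvalid word = false := by
          simp [pvInvalid, h2]
        have hsc : pvScore word = 10 := by
          rw [pvScore, if_pos]
          constructor
          · simp [hl]
          · rw [PySem.Str.startswith_eq, PySem.Chars.startswith_iff, hl]
            show (['Q', 'U'] : List Char) <+: _
            exact ⟨t, rfl⟩
        rw [ih, hinv, hsc]
        simp only [Bool.false_or]
        split
        · rfl
        · ring
      · next h2 =>
        simp only [PySem.Str.pyGet?_eq, PySem.Chars.pyGet?_eq_listPyGet?] at h2
        have hinv : pvInvalid word = true := by
          simp [pvInvalid, h2, PySem.List.pyGet?_zero, hq]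
          simpa using hlen
        rw [hinv]
        simp
    · next h1 =>
      simp only [PySem.Str.len_eq, PySem.Str.pyGet?_eq, not_and,
        PySem.Chars.pyGet?_eq_listPyGet?,
        PySem.List.pyGet?_zero] at h1
      have hnoQU : ∀ t, word.toList ≠ 'Q' :: 'U' :: t := by
        intro t ht
        have := h1 (by simp [ht]) -- contradiction with word[0]
        rw [ht] at this
        simp at this
      have hinv : pvInvalid word = false := by
        simp only [pvInvalid, Bool.and_eq_false_iff]
        by_cases hlen : (1 : Int) < PySem.Str.len word
        · left; right
          simp only [beq_eq_false_iff_ne, ne_eq]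
          intro hq
          apply h1
          · simpa using hlen
          · simpa [PySem.List.pyGet?_zero] using hq
        · left; left; simpa using hlen
      have hsc : pvScore word = 1 := by
        rw [pvScore, if_neg]
        rintro ⟨hlen, hsw⟩
        rw [PySem.Str.startswith_eq, PySem.Chars.startswith_iff] at hsw
        obtain ⟨t, ht⟩ := hsw
        exact hnoQU t ht.symm
      rw [ih, hinv, hsc]
      simp only [Bool.false_or]
      split
      · rfl
      · ring

-- ===== VERDICT (by name: the statement is the Claim_ definition above) =====
theorem launch_scrabble_spec : Claim_equal_launch_scrabble := by
  intro words _
  show launch_scrabble words = launch_scrabble_alt words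
  rw [launch_scrabble, launch_scrabble_alt, go_eq]
  simp
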